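-- pv_equiv track=rewrite | github.com/peehscavacini/LP2_2s2017 | ex04.py | maior_ponta
-- ===== SOURCE A (Python) =====
-- def maior_ponta(nums):
--   lista = []
--   for i in range(len(nums)):
--     if nums[0] > nums[-1]:
--       lista.append(nums[0])
--     else:
--       lista.append(nums[-1])
--   return lista
-- ===== SOURCE B (Python) =====
-- def maior_ponta(nums):
--   if not nums:
--     return []
--   val = max(nums[0], nums[-1])
--   return [val] * len(nums)
-- ===== Notes on version B (the rewrite author's own statement) =====
-- stated objective: simpler
-- what changed: B computes the larger endpoint once with max and builds the result by list multiplication, instead of re-comparing the two endpoints inside an n-iteration append loop.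
import Mathlib
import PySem

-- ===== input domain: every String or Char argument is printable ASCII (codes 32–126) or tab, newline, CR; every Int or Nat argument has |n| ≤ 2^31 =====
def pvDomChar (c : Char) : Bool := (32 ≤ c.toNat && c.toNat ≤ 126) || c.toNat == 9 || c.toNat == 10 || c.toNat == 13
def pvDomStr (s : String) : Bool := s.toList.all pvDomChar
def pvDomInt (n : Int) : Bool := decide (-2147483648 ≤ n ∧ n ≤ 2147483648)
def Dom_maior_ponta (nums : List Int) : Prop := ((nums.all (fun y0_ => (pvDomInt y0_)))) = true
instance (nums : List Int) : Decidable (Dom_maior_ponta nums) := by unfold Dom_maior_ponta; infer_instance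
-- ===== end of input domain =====

-- B computes the larger endpoint once (max) and builds the result by replication,
-- instead of A's per-iteration endpoint comparison inside an append loop; objective: simpler.

-- ===== PORT A =====
-- Loop body appends nums[0] or nums[-1]; the loop runs only when nums ≠ [],
-- so the .getD 0 default of the Option lookups is never the produced value.
def maior_ponta (nums : List Int) : List Int :=
  (PySem.List.pyRange 0 (nums.length : Int) 1).foldl
    (fun lista _ =>
      if (PySem.List.pyGet? nums 0).getD 0 > (PySem.List.pyGet? nums (-1)).getD 0 then
        lista ++ [(PySem.List.pyGet? nums 0).getD 0]
      else
        lista ++ [(PySem.List.pyGet? nums (-1)).getD 0])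
    []

-- ===== PORT B =====
def maior_ponta_alt (nums : List Int) : List Int :=
  match nums with
  | [] => []
  | x :: xs => List.replicate (x :: xs).length (max x ((x :: xs).getLast (by simp)))

-- ===== PRECONDITION & SPEC =====
def Spec_maior_ponta (nums : List Int) (out : List Int) : Prop := out = maior_ponta_alt nums
instance (nums : List Int) (out : List Int) : Decidable (Spec_maior_ponta nums out) := by unfold Spec_maior_ponta; infer_instance

-- ===== CLAIM (what is proved, stated in full; the proofs are below) =====
def Claim_equal_maior_ponta : Prop := ∀ (nums : List Int), Dom_maior_ponta nums → Spec_maior_ponta nums (maior_ponta nums)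

-- ===== LEMMAS AND PROOFS =====

-- folding "append one fixed element" over any list yields acc ++ replicate
theorem foldl_append_const {α β : Type} (l : List β) (acc : List α) (v : α) :
    l.foldl (fun lista _ => lista ++ [v]) acc = acc ++ List.replicate l.length v := by
  induction l generalizing acc with
  | nil => simp
  | cons b bs ih => simp [List.foldl, ih, List.replicate_succ]

-- ===== VERDICT (by name: the statement is the Claim_ definition above) =====
theorem maior_ponta_spec : Claim_equal_maior_ponta := by
  intro nums _
  unfold Spec_maior_ponta maior_ponta maior_ponta_alt
  match nums with
  | [] => simp [PySem.List.pyRange_zero]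
  | x :: xs =>
    have h0 : PySem.List.pyGet? (x :: xs) 0 = some x := PySem.List.pyGet?_zero_cons _ _
    have h1 : PySem.List.pyGet? (x :: xs) (-1) = (x :: xs).getLast? := PySem.List.pyGet?_neg_one _
    have hl : (x :: xs).getLast? = some ((x :: xs).getLast (by simp)) := by
      simp [List.getLast?_eq_some_getLast]
    rw [h0, h1, hl]
    simp only [Option.getD_some]
    set g := (x :: xs).getLast (by simp) with hg
    have hbody : ∀ (l : List Int), (if x > g then l ++ [x] else l ++ [g]) = l ++ [max x g] := by
      intro l
      by_cases h : x > g
      · simp [h, max_eq_left h.le]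
      · simp [h, max_eq_right (not_lt.mp h)]
    simp only [hbody, foldl_append_const]
    simp [PySem.List.length_pyRange_one]
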